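-- pv_equiv track=rewrite | github.com/davidfarmer/SL3X | utilities.py | text_before
-- ===== SOURCE A (Python) =====
-- def text_before(text, target):
--     """If text is of the form *target*, return (*,target*).
--     Otherwise, return ("",text)
--     Note that target can be a tuple.
--     """
--
--     thetext = text
--     thetarget = target
--
--     if isinstance(thetarget, str):  # basestring uncludes str and unicode
--         thetarget = [thetarget]
--     thetarget = tuple(thetarget)
--
--     firstpart = ""
--
--     while thetext and not thetext.startswith(thetarget):
--         firstpart += thetext[0]
--         thetext = thetext[1:]
--
--     if thetext:
--         return (firstpart,thetext)
--     else:
--         return("",text)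
-- ===== SOURCE B (Python) =====
-- def text_before(text, target):
--     """Split text at the earliest position where some target matches,
--     using str.find per target instead of a per-position startswith scan."""
--     if isinstance(target, str):
--         target = [target]
--     target = tuple(target)
--     hits = [p for p in (text.find(t) for t in target) if p != -1]
--     i = min(hits) if hits else -1
--     if i != -1 and text[i:]:
--         return (text[:i], text[i:])
--     return ("", text)
-- ===== Notes on version B (the rewrite author's own statement) =====
-- stated objective: faster
-- what changed: replaces A's per-position loop (pop one char, re-test startswith, rebuild strings) by a single str.find per target plus two slices, so the scan runs inside the C substring search instead of a Python while-loop with quadratic string concatenation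
import Mathlib
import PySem

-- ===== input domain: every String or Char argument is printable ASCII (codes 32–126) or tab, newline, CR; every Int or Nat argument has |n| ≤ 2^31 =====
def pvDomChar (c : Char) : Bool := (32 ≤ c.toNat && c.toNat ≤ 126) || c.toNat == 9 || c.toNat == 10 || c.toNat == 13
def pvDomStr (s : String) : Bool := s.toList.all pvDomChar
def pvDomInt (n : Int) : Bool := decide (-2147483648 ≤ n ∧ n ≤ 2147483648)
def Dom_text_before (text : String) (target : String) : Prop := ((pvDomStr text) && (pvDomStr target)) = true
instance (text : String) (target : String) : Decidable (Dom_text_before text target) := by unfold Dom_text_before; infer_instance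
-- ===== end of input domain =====

-- B replaces A's per-position startswith loop by one str.find plus two slices (faster mechanism: one substring search instead of a quadratic rebuild loop); return values proved equal on all inputs.

-- ===== PORT A =====
-- A's while loop: while thetext and not thetext.startswith(target): firstpart += thetext[0]; thetext = thetext[1:]
-- (target, a str here, is wrapped to the one-element tuple (target,), so startswith tests just target)
def tbLoopA (tgt : List Char) : List Char → List Char → List Char × List Char
  | [], fp => (fp, [])
  | c :: rest, fp =>
      if PySem.Chars.startswith (c :: rest) tgt then (fp, c :: rest)
      else tbLoopA tgt rest (fp ++ [c])

def text_before (text : String) (target : String) : String × String :=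
  let r := tbLoopA target.toList text.toList []
  if r.2 ≠ [] then (String.ofList r.1, String.ofList r.2) else ("", text)

-- ===== PORT B =====
-- Source B specialised to a str target (the Lean signature fixes target : String): the
-- hits list is [text.find(target)] filtered on ≠ -1, so i = min(hits or [-1]) = text.find(target).
def text_before_alt (text : String) (target : String) : String × String :=
  let i := PySem.Str.find text target
  if i ≠ -1 ∧ PySem.Str.slice text (some i) none ≠ "" then
    (PySem.Str.slice text none (some i), PySem.Str.slice text (some i) none)
  else ("", text)

-- ===== PRECONDITION & SPEC =====
def Spec_text_before (text : String) (target : String) (out : String × String) : Prop := out = text_before_alt text target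
instance (text : String) (target : String) (out : String × String) : Decidable (Spec_text_before text target out) := by unfold Spec_text_before; infer_instance

-- ===== CLAIM (what is proved, stated in full; the proofs are below) =====
def Claim_equal_text_before : Prop := ∀ (text : String) (target : String), Dom_text_before text target → Spec_text_before text target (text_before text target)

-- ===== LEMMAS AND PROOFS =====

-- find on a cons, when the pattern is not a prefix at position 0
lemma find_cons_of_not_prefix (c : Char) (s t : List Char) (h : ¬ t <+: c :: s) :
    PySem.Chars.find (c :: s) t =
      if PySem.Chars.find s t = -1 then -1 else PySem.Chars.find s t + 1 := by
  by_cases hinf : t <:+: c :: s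
  · have htail : t <:+: s := (List.infix_cons_iff.mp hinf).resolve_left h
    have hg : 0 ≤ PySem.Chars.find s t := (PySem.Chars.find_nonneg_iff s t).mpr htail
    have hf : 0 ≤ PySem.Chars.find (c :: s) t := (PySem.Chars.find_nonneg_iff _ t).mpr hinf
    obtain ⟨hgpre, hgmin⟩ := PySem.Chars.find_spec hg
    obtain ⟨hfpre, hfmin⟩ := PySem.Chars.find_spec hf
    set g := (PySem.Chars.find s t).toNat with hgdef
    set f := (PySem.Chars.find (c :: s) t).toNat with hfdef
    have hfne : f ≠ 0 := by
      intro h0; rw [h0] at hfpre; simp at hfpre; exact h hfpre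
    have hfpre' : t <+: s.drop (f - 1) := by
      have hf1 : f = (f - 1) + 1 := by omega
      rw [hf1] at hfpre
      simpa using hfpre
    have h1 : g ≤ f - 1 := by
      by_contra hlt
      exact hgmin (f - 1) (by omega) hfpre'
    have h2 : f ≤ g + 1 := by
      by_contra hlt
      have : t <+: (c :: s).drop (g + 1) := by simpa using hgpre
      exact hfmin (g + 1) (by omega) this
    have : f = g + 1 := by omega
    have hne : PySem.Chars.find s t ≠ -1 := by omega
    rw [if_neg hne]
    omega
  · have h1 : PySem.Chars.find (c :: s) t = -1 := (PySem.Chars.find_eq_neg_one_iff _ t).mpr hinf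
    have h2 : PySem.Chars.find s t = -1 :=
      (PySem.Chars.find_eq_neg_one_iff s t).mpr (fun hs => hinf (hs.trans (List.infix_cons_iff.mpr (Or.inr (List.infix_refl s)))))
    simp [h1, h2]

-- A's loop characterised by find, for a nonempty pattern
lemma tbLoopA_find (t : List Char) (ht : t ≠ []) :
    ∀ (s fp : List Char),
      tbLoopA t s fp =
        if PySem.Chars.find s t = -1 then (fp ++ s, [])
        else (fp ++ s.take (PySem.Chars.find s t).toNat, s.drop (PySem.Chars.find s t).toNat) := by
  intro s
  induction s with
  | nil =>
    intro fp
    have : PySem.Chars.find ([] : List Char) t = -1 :=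
      (PySem.Chars.find_eq_neg_one_iff [] t).mpr (by simp [List.infix_nil, ht])
    simp [tbLoopA, this]
  | cons c rest ih =>
    intro fp
    by_cases hp : t <+: c :: rest
    · have hsw : PySem.Chars.startswith (c :: rest) t = true := (PySem.Chars.startswith_iff _ t).mpr hp
      have hinf : t <:+: c :: rest := hp.isInfix
      have hf : 0 ≤ PySem.Chars.find (c :: rest) t := (PySem.Chars.find_nonneg_iff _ t).mpr hinf
      obtain ⟨_, hfmin⟩ := PySem.Chars.find_spec hf
      have hf0 : (PySem.Chars.find (c :: rest) t).toNat = 0 := by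
        by_contra h0
        exact hfmin 0 (by omega) (by simpa using hp)
      have hne : PySem.Chars.find (c :: rest) t ≠ -1 := by omega
      simp [tbLoopA, hsw, hne, hf0]
    · have hsw : PySem.Chars.startswith (c :: rest) t = false := by
        rw [← Bool.not_eq_true, PySem.Chars.startswith_iff]; exact hp
      have hcons := find_cons_of_not_prefix c rest t hp
      by_cases hrest : PySem.Chars.find rest t = -1
      · simp [tbLoopA, hsw, ih, hrest, hcons]
      · have hg : 0 ≤ PySem.Chars.find rest t := by
          have := PySem.Chars.neg_one_le_find rest t; omega
        have hne : PySem.Chars.find (c :: rest) t ≠ -1 := by rw [hcons, if_neg hrest]; omega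
        have htn : (PySem.Chars.find (c :: rest) t).toNat = (PySem.Chars.find rest t).toNat + 1 := by
          rw [hcons, if_neg hrest]; omega
        simp [tbLoopA, hsw, ih, hrest, hne, htn, List.take_succ_cons, List.drop_succ_cons]

lemma ofList_eq_iff (l : List Char) (s : String) : String.ofList l = s ↔ l = s.toList := by
  constructor
  · intro h; rw [← h]; simp
  · intro h; rw [h]; simp

theorem text_before_eq (text target : String) :
    text_before text target = text_before_alt text target := by
  unfold text_before text_before_alt
  by_cases ht : target.toList = []
  · -- empty target: find = 0, loop exits immediately
    have hfind : PySem.Str.find text target = 0 := by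
      rw [PySem.Str.find_eq, ht, PySem.Chars.find_nil]
    cases hs : text.toList with
    | nil =>
      have htext : text = "" := by
        have := congrArg String.ofList hs; simpa using this
      have h1 : PySem.Str.slice "" (some 0) none = "" := by decide
      simp [ht, tbLoopA, htext, h1]
    | cons c rest =>
      have hsw : PySem.Chars.startswith (c :: rest) target.toList = true := by
        rw [PySem.Chars.startswith_iff, ht]; exact List.nil_prefix
      have hslice : PySem.Str.slice text (some 0) none = text := by
        rw [← String.toList_inj, PySem.Str.toList_slice]
        simp [PySem.Chars.slice_eq_listSlice, PySem.List.slice_from text.toList (a := 0) (by omega)]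
      have hslice0 : PySem.Str.slice text none (some 0) = "" := by
        rw [← String.toList_inj, PySem.Str.toList_slice]
        simp [PySem.Chars.slice_eq_listSlice, PySem.List.slice_to text.toList (b := 0) (by omega)]
      have htext : text ≠ "" := by
        intro h; rw [h] at hs; simp at hs
      simp only [tbLoopA, hsw, if_true, hfind]
      simp [hslice, hslice0, htext, ofList_eq_iff, hs]
  · -- nonempty target
    have hloop := tbLoopA_find target.toList ht text.toList
    rw [PySem.Str.find_eq]
    by_cases hf : PySem.Chars.find text.toList target.toList = -1
    · simp [hloop, hf]
    · have h0 : 0 ≤ PySem.Chars.find text.toList target.toList := by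
        have := PySem.Chars.neg_one_le_find text.toList target.toList; omega
      obtain ⟨hpre, _⟩ := PySem.Chars.find_spec h0
      have hdropne : text.toList.drop (PySem.Chars.find text.toList target.toList).toNat ≠ [] := by
        intro hnil; rw [hnil] at hpre
        exact ht (List.prefix_nil.mp hpre)
      have hsfrom : (PySem.Str.slice text (some (PySem.Chars.find text.toList target.toList)) none).toList
          = text.toList.drop (PySem.Chars.find text.toList target.toList).toNat := by
        rw [PySem.Str.toList_slice]
        simp [PySem.Chars.slice_eq_listSlice, PySem.List.slice_from text.toList h0]
      have hsto : (PySem.Str.slice text none (some (PySem.Chars.find text.toList target.toList))).toList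
          = text.toList.take (PySem.Chars.find text.toList target.toList).toNat := by
        rw [PySem.Str.toList_slice]
        simp [PySem.Chars.slice_eq_listSlice, PySem.List.slice_to text.toList h0]
      have hsne : PySem.Str.slice text (some (PySem.Chars.find text.toList target.toList)) none ≠ "" := by
        intro h
        rw [← String.toList_inj, hsfrom, show ("" : String).toList = [] from rfl] at h
        exact hdropne h
      simp only [hloop, if_neg hf, List.nil_append]
      simp [hf, hsne, hdropne, ofList_eq_iff, hsfrom, hsto]

-- ===== VERDICT (by name: the statement is the Claim_ definition above) =====
theorem text_before_spec : Claim_equal_text_before := by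
  intro text target _
  unfold Spec_text_before
  exact text_before_eq text target
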